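-- pv_equiv track=rewrite | github.com/clouatre-labs/code-analyze-mcp | docs/benchmarks/v5/scripts/validate.py | validate_condition_a
-- ===== SOURCE A (Python) =====
-- from typing import List, Dict, Tuple, Optional
--
-- def validate_condition_a(tools_by_name: Dict[str, int], tools_list: List[Dict]) -> Tuple[bool, List[str]]:
--     """
--     Validate Condition A:
--     - developer__analyze must be used
--     - code-analyze-mcp__analyze must NOT be used
--     """
--     issues = []
--
--     # Check for developer__analyze
--     has_analyze = any('analyze' in name and 'code-analyze-mcp' not in name for name in tools_by_name)
--     if not has_analyze:
--         issues.append("ERROR: developer__analyze not used (required for Condition A)")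
--
--     # Check for code-analyze-mcp
--     has_mcp = any('code-analyze-mcp' in name for name in tools_by_name)
--     if has_mcp:
--         issues.append(f"ERROR: code-analyze-mcp tool used (forbidden for Condition A): {[n for n in tools_by_name if 'code-analyze-mcp' in n]}")
--
--     passed = len(issues) == 0
--     return passed, issues
-- ===== SOURCE B (Python) =====
-- def validate_condition_a(tools_by_name, tools_list):
--     def classify(name):
--         if 'code-analyze-mcp' in name:
--             return 'mcp'
--         if 'analyze' in name:
--             return 'analyze'
--         return 'other'
--
--     groups = {}
--     for name in tools_by_name:
--         groups.setdefault(classify(name), []).append(name)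
--
--     issues = []
--     if 'analyze' not in groups:
--         issues.append("ERROR: developer__analyze not used (required for Condition A)")
--     if 'mcp' in groups:
--         issues.append(f"ERROR: code-analyze-mcp tool used (forbidden for Condition A): {groups['mcp']}")
--     return not issues, issues
-- ===== Notes on version B (the rewrite author's own statement) =====
-- stated objective: alternative
-- what changed: A's two any() scans and a filtering comprehension are replaced by a classify-and-group decomposition: each name is mapped to one of three categories ('mcp'/'analyze'/'other'), a dict of category->names is built once with setdefault, and both errors are read off that index (key presence and the 'mcp' group).
import Mathlib
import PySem

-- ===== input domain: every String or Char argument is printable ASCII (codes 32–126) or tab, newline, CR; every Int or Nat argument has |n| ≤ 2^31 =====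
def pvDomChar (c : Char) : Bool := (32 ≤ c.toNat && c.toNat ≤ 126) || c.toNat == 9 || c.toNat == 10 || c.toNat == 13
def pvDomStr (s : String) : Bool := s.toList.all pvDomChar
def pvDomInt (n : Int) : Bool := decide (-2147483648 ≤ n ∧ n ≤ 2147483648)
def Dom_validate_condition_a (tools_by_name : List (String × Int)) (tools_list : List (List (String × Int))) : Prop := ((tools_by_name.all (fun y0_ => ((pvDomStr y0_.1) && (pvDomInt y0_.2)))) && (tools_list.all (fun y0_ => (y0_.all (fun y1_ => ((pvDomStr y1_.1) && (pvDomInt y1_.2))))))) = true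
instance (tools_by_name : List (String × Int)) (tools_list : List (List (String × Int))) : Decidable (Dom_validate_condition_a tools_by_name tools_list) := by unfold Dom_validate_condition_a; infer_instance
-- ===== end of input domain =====

-- B replaces A's two any() scans and filtering comprehension by a classify-and-group
-- decomposition: one grouping dict (category -> names) built once, answers read off it.
-- Objective: alternative.

-- Shared formatting helper: Python's repr of a str over the printable-ASCII(+tab/NL/CR) domain
-- (single quotes unless the string contains ' and no "; \\, quote, tab, NL, CR escaped).
def pyStrRepr (s : String) : String :=
  let cs := s.toList
  let q : Char := if cs.contains '\'' && !cs.contains '"' then '"' else '\''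
  let esc := cs.flatMap (fun c =>
    if c = '\\' then ['\\', '\\']
    else if c = q then ['\\', q]
    else if c = '\t' then ['\\', 't']
    else if c = '\n' then ['\\', 'n']
    else if c = '\r' then ['\\', 'r']
    else [c])
  String.mk ((q :: esc) ++ [q])

-- str() of a Python list of strings, as in the f-strings of A and B
def pyListRepr (l : List String) : String :=
  "[" ++ String.intercalate ", " (l.map pyStrRepr) ++ "]"

-- ===== PORT A =====
-- iterating a Python dict visits its distinct keys in insertion order: PySem.Set.ofList of the key list
def validate_condition_a (tools_by_name : List (String × Int)) (tools_list : List (List (String × Int))) : Bool × List String :=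
  let names := PySem.Set.ofList (tools_by_name.map (·.1))
  let issues : List String := []
  let has_analyze := names.any (fun n => PySem.Str.isIn "analyze" n && !(PySem.Str.isIn "code-analyze-mcp" n))
  let issues := if !has_analyze then issues ++ ["ERROR: developer__analyze not used (required for Condition A)"] else issues
  let has_mcp := names.any (fun n => PySem.Str.isIn "code-analyze-mcp" n)
  let issues := if has_mcp then
      issues ++ ["ERROR: code-analyze-mcp tool used (forbidden for Condition A): " ++
        pyListRepr (names.filter (fun n => PySem.Str.isIn "code-analyze-mcp" n))]
    else issues
  (issues.length == 0, issues)

-- ===== PORT B =====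
def classifyName (name : String) : String :=
  if PySem.Str.isIn "code-analyze-mcp" name then "mcp"
  else if PySem.Str.isIn "analyze" name then "analyze"
  else "other"

def validate_condition_a_alt (tools_by_name : List (String × Int)) (tools_list : List (List (String × Int))) : Bool × List String :=
  let names := PySem.Set.ofList (tools_by_name.map (·.1))
  -- groups.setdefault(classify(name), []).append(name)  ==  modify key [] (· ++ [name])
  let groups := names.foldl (fun d n => d.modify (classifyName n) [] (· ++ [n])) PySem.Dict.empty
  let issues : List String :=
    (if !(groups.contains "analyze") then ["ERROR: developer__analyze not used (required for Condition A)"] else []) ++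
    -- groups['mcp'] cannot raise under the contains guard: getD is exact here
    (if groups.contains "mcp" then
      ["ERROR: code-analyze-mcp tool used (forbidden for Condition A): " ++ pyListRepr (groups.getD "mcp" [])]
     else [])
  (issues.isEmpty, issues)

-- ===== PRECONDITION & SPEC =====
def Spec_validate_condition_a (tools_by_name : List (String × Int)) (tools_list : List (List (String × Int))) (out : Bool × List String) : Prop := out = validate_condition_a_alt tools_by_name tools_list
instance (tools_by_name : List (String × Int)) (tools_list : List (List (String × Int))) (out : Bool × List String) : Decidable (Spec_validate_condition_a tools_by_name tools_list out) := by unfold Spec_validate_condition_a; infer_instance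

-- ===== CLAIM =====
def Claim_equal_validate_condition_a : Prop := ∀ (tools_by_name : List (String × Int)) (tools_list : List (List (String × Int))), Dom_validate_condition_a tools_by_name tools_list → Spec_validate_condition_a tools_by_name tools_list (validate_condition_a tools_by_name tools_list)

-- ===== LEMMAS AND PROOFS =====
theorem classify_beq_mcp (n : String) :
    (classifyName n == "mcp") = PySem.Str.isIn "code-analyze-mcp" n := by
  unfold classifyName
  cases h1 : PySem.Str.isIn "code-analyze-mcp" n <;>
    cases h2 : PySem.Str.isIn "analyze" n <;> simp

theorem classify_beq_analyze (n : String) :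
    (classifyName n == "analyze") =
      (PySem.Str.isIn "analyze" n && !(PySem.Str.isIn "code-analyze-mcp" n)) := by
  unfold classifyName
  cases h1 : PySem.Str.isIn "code-analyze-mcp" n <;>
    cases h2 : PySem.Str.isIn "analyze" n <;> simp

theorem groups_getD (names : List String) (c : String) :
    (names.foldl (fun d n => d.modify (classifyName n) [] (· ++ [n])) PySem.Dict.empty).getD c []
      = names.filter (fun n => classifyName n == c) := by
  have h := PySem.Dict.getD_foldl_modify_append
    (l := names.map (fun n => (classifyName n, n))) (d := PySem.Dict.empty) (c := c)
  rw [List.foldl_map] at h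
  simpa [List.filter_map, Function.comp_def, List.map_map] using h

theorem groups_contains (names : List String) (c : String) :
    (names.foldl (fun d n => d.modify (classifyName n) [] (· ++ [n])) PySem.Dict.empty).contains c
      = names.any (fun n => classifyName n == c) := by
  rw [PySem.Dict.contains_eq_decide_mem_keys,
      PySem.Dict.keys_foldl_modify_key (key := classifyName)]
  simp only [PySem.Dict.keys_empty]
  rw [Bool.eq_iff_iff]
  constructor
  · intro h
    rw [decide_eq_true_eq, PySem.Set.mem_update, List.mem_map] at h
    rcases h with h | ⟨n, hn, rfl⟩
    · simp at h
    · exact List.any_eq_true.mpr ⟨n, hn, by simp⟩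
  · intro h
    obtain ⟨n, hn, hc⟩ := List.any_eq_true.mp h
    rw [decide_eq_true_eq, PySem.Set.mem_update, List.mem_map]
    exact Or.inr ⟨n, hn, by simpa using hc⟩

-- ===== VERDICT =====
theorem validate_condition_a_spec : Claim_equal_validate_condition_a := by
  intro tools_by_name tools_list _
  unfold Spec_validate_condition_a validate_condition_a validate_condition_a_alt
  simp only [groups_contains, groups_getD]
  set names := PySem.Set.ofList (tools_by_name.map (·.1)) with hn
  have e1 : (names.any (fun n => classifyName n == "analyze"))
      = names.any (fun n => PySem.Str.isIn "analyze" n && !(PySem.Str.isIn "code-analyze-mcp" n)) := by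
    exact congrArg (fun f => names.any f) (funext fun n => classify_beq_analyze n)
  have e2 : (names.any (fun n => classifyName n == "mcp"))
      = names.any (fun n => PySem.Str.isIn "code-analyze-mcp" n) := by
    exact congrArg (fun f => names.any f) (funext fun n => classify_beq_mcp n)
  have e3 : names.filter (fun n => classifyName n == "mcp")
      = names.filter (fun n => PySem.Str.isIn "code-analyze-mcp" n) := by
    exact congrArg (fun f => names.filter f) (funext fun n => classify_beq_mcp n)
  rw [e1, e2, e3]
  cases names.any (fun n => PySem.Str.isIn "analyze" n && !(PySem.Str.isIn "code-analyze-mcp" n)) <;>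
    cases names.any (fun n => PySem.Str.isIn "code-analyze-mcp" n) <;> simp
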